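-- pv_equiv track=rewrite | github.com/ziren926/newsdigitalhuman | news.py | generate_subtitles
-- ===== SOURCE A (Python) =====
-- def generate_subtitles(texts, duration_per_text):
--     subtitles = []
--     start_time = 0
--     for text in texts:
--         end_time = start_time + duration_per_text
--         subtitles.append(((start_time, end_time), text))
--         start_time = end_time
--     return subtitles
-- ===== SOURCE B (Python) =====
-- def generate_subtitles(texts, duration_per_text):
--     n = len(texts)
--     ends = [duration_per_text * (i + 1) for i in range(n)]
--     starts = [0] + ends[:-1]
--     return [((s, e), t) for s, e, t in zip(starts, ends, texts)]
-- ===== Notes on version B (the rewrite author's own statement) =====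
-- stated objective: alternative
-- what changed: Replaces the accumulator-threading loop with a boundary-table decomposition: closed-form end boundaries d*(i+1), start boundaries shifted by one, then a zip to pair intervals with texts.
import Mathlib
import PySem

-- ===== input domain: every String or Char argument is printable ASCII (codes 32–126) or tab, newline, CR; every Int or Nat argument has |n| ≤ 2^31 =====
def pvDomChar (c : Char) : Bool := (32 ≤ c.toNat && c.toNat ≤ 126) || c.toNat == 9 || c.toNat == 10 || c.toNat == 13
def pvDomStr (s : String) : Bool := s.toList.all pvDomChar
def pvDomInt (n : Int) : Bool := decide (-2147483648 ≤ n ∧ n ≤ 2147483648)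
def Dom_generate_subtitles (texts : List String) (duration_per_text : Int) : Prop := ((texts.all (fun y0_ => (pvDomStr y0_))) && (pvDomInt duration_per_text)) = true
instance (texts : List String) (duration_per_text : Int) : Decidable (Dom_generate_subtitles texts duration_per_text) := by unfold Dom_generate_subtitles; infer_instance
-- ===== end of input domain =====

-- B replaces A's accumulator-threading loop by a boundary-table decomposition (closed-form
-- end boundaries, shifted start boundaries, then one zip); same cost, different structure.

-- ===== PORT A =====
-- literal port of Source A: one loop threading (subtitles, start_time)
def generate_subtitles (texts : List String) (duration_per_text : Int) : List ((Int × Int) × String) :=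
  (texts.foldl
    (fun st text =>
      let end_time := st.2 + duration_per_text
      (st.1 ++ [((st.2, end_time), text)], end_time))
    (([] : List ((Int × Int) × String)), (0 : Int))).1

-- ===== PORT B =====
-- literal port of Source B: ends = [d*(i+1) for i in range(n)]; starts = [0] + ends[:-1]; zip
def generate_subtitles_alt (texts : List String) (duration_per_text : Int) : List ((Int × Int) × String) :=
  let n : Int := texts.length
  let ends := (PySem.List.pyRange 0 n 1).map (fun i => duration_per_text * (i + 1))
  let starts := (0 : Int) :: ends.dropLast
  (starts.zip (ends.zip texts)).map (fun p => ((p.1, p.2.1), p.2.2))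

-- ===== PRECONDITION & SPEC =====
def Spec_generate_subtitles (texts : List String) (duration_per_text : Int) (out : List ((Int × Int) × String)) : Prop := out = generate_subtitles_alt texts duration_per_text
instance (texts : List String) (duration_per_text : Int) (out : List ((Int × Int) × String)) : Decidable (Spec_generate_subtitles texts duration_per_text out) := by unfold Spec_generate_subtitles; infer_instance

-- ===== CLAIM (what is proved, stated in full; the proofs are below) =====
def Claim_equal_generate_subtitles : Prop := ∀ (texts : List String) (duration_per_text : Int), Dom_generate_subtitles texts duration_per_text → Spec_generate_subtitles texts duration_per_text (generate_subtitles texts duration_per_text)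

-- ===== LEMMAS AND PROOFS =====

-- reference list: the interval-text pairs starting at time s
def specSub (d : Int) : List String → Int → List ((Int × Int) × String)
  | [], _ => []
  | t :: r, s => ((s, s + d), t) :: specSub d r (s + d)

theorem specSub_length (d : Int) (texts : List String) : ∀ s, (specSub d texts s).length = texts.length := by
  induction texts with
  | nil => intro s; rfl
  | cons t r ih => intro s; simp [specSub, ih]

theorem specSub_getElem (d : Int) (texts : List String) : ∀ (s : Int) (i : Nat) (h : i < texts.length),
    (specSub d texts s)[i]'(by rw [specSub_length]; exact h) = ((s + d * i, s + d * (i + 1)), texts[i]'h) := by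
  induction texts with
  | nil => intro s i h; simp at h
  | cons t r ih =>
    intro s i h
    cases i with
    | zero => simp [specSub]
    | succ j =>
      simp only [specSub, List.getElem_cons_succ]
      rw [ih (s + d) j (by simpa using h)]
      push_cast
      simp only [Prod.mk.injEq]
      exact ⟨⟨by ring, by ring⟩, trivial⟩

theorem foldl_specSub (d : Int) (texts : List String) :
    ∀ (acc : List ((Int × Int) × String)) (s : Int),
      (texts.foldl
        (fun st text =>
          let end_time := st.2 + d
          (st.1 ++ [((st.2, end_time), text)], end_time)) (acc, s)).1
      = acc ++ specSub d texts s := by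
  induction texts with
  | nil => intro acc s; simp [specSub]
  | cons t r ih => intro acc s; simp [List.foldl, specSub, ih]

theorem alt_eq_specSub (texts : List String) (d : Int) :
    generate_subtitles_alt texts d = specSub d texts 0 := by
  unfold generate_subtitles_alt
  simp only [PySem.List.pyRange_one]
  apply List.ext_getElem
  · simp [specSub_length]
    omega
  · intro i h1 h2
    rw [specSub_length] at h2
    rw [specSub_getElem d texts 0 i h2]
    simp only [List.getElem_map, List.getElem_zip]
    cases i with
    | zero =>
      simp only [List.getElem_cons_zero, Prod.mk.injEq]
      refine ⟨⟨by ring, ?_⟩, trivial⟩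
      simp [List.getElem_range]
    | succ j =>
      simp only [List.getElem_cons_succ]
      rw [List.getElem_dropLast]
      simp only [List.getElem_map, List.getElem_range, Prod.mk.injEq]
      push_cast
      exact ⟨⟨by ring, by ring⟩, trivial⟩

-- ===== VERDICT (by name: the statement is the Claim_ definition above) =====
theorem generate_subtitles_spec : Claim_equal_generate_subtitles := by
  intro texts d _
  unfold Spec_generate_subtitles generate_subtitles
  rw [foldl_specSub, alt_eq_specSub]
  simp
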